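-- pv_equiv track=rewrite | github.com/cieslakamil/web-scrapper | product.py | get_recommendation_stats
-- ===== SOURCE A (Python) =====
-- def get_recommendation_stats(opinions):
--     recommendations = [0, 0, 0]
--     for opinion in opinions:
--         if opinion['recommendation'] == 'Polecam':
--             recommendations[2] += 1
--         elif opinion['recommendation'] == 'Nie polecam':
--             recommendations[1] += 1
--         else:
--             recommendations[0] += 1
--     return recommendations
-- ===== SOURCE B (Python) =====
-- def get_recommendation_stats(opinions):
--     bucket = {'Polecam': 2, 'Nie polecam': 1}
--     indices = [bucket.get(opinion['recommendation'], 0) for opinion in opinions]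
--     return [indices.count(i) for i in range(3)]
-- ===== Notes on version B (the rewrite author's own statement) =====
-- stated objective: alternative
-- what changed: Replaces the three-way branch with mutable counters by a table-driven scheme: each opinion is mapped to a bucket index via a lookup dict (default 0), and the result list is built by counting each index over range(3) instead of incrementing counters.
import Mathlib
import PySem

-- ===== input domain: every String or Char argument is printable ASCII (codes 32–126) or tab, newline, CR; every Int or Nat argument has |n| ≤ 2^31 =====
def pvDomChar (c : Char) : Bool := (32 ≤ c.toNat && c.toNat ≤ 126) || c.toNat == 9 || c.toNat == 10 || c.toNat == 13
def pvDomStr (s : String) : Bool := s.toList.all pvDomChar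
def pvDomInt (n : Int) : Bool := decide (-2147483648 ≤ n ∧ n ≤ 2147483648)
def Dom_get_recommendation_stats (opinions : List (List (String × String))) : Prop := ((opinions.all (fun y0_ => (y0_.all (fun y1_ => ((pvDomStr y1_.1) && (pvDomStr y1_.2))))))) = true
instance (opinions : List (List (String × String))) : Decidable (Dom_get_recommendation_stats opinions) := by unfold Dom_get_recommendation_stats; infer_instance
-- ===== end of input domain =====

-- B replaces the three-way branch with a lookup-table bucket index per opinion and builds the result by counting indices over range(3); alternative decomposition, same cost.

-- opinion['recommendation'] (KeyError excluded by Pre_): first match in the association list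
def pvRec (opinion : List (String × String)) : String :=
  ((PySem.Dict.ofList opinion).get? "recommendation").getD ""

-- ===== PORT A =====
-- the loop body: the three-way branch updating the [else, nie-polecam, polecam] counters
def pvStepA (r : Int × Int × Int) (opinion : List (String × String)) : Int × Int × Int :=
  if pvRec opinion = "Polecam" then (r.1, r.2.1, r.2.2 + 1)
  else if pvRec opinion = "Nie polecam" then (r.1, r.2.1 + 1, r.2.2)
  else (r.1 + 1, r.2.1, r.2.2)

def get_recommendation_stats (opinions : List (List (String × String))) : List Int :=
  let r := opinions.foldl pvStepA (0, 0, 0)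
  [r.1, r.2.1, r.2.2]

-- ===== PORT B =====
-- bucket = {'Polecam': 2, 'Nie polecam': 1}
def pvBucket : PySem.Dict String Int := PySem.Dict.ofList [("Polecam", 2), ("Nie polecam", 1)]

def get_recommendation_stats_alt (opinions : List (List (String × String))) : List Int :=
  let indices := opinions.map (fun opinion => pvBucket.getD (pvRec opinion) 0)
  (PySem.List.pyRange 0 3 1).map (fun i => (indices.count i : Int))

-- ===== PRECONDITION & SPEC =====
-- Pre_ excludes exactly the inputs where Python A (and B) raises KeyError: an opinion without the 'recommendation' key
def Pre_get_recommendation_stats (opinions : List (List (String × String))) : Prop :=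
  ∀ opinion ∈ opinions, "recommendation" ∈ opinion.map Prod.fst
instance (opinions : List (List (String × String))) : Decidable (Pre_get_recommendation_stats opinions) := by unfold Pre_get_recommendation_stats; infer_instance
def pvWitness_get_recommendation_stats : (List (List (String × String))) :=
  [[("recommendation", "Polecam")], [("recommendation", "meh")]]
def Spec_get_recommendation_stats (opinions : List (List (String × String))) (out : List Int) : Prop := out = get_recommendation_stats_alt opinions
instance (opinions : List (List (String × String))) (out : List Int) : Decidable (Spec_get_recommendation_stats opinions out) := by unfold Spec_get_recommendation_stats; infer_instance

-- ===== CLAIM =====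
def Claim_equal_get_recommendation_stats : Prop := ∀ (opinions : List (List (String × String))), Dom_get_recommendation_stats opinions → Pre_get_recommendation_stats opinions → Spec_get_recommendation_stats opinions (get_recommendation_stats opinions)

-- ===== LEMMAS AND PROOFS =====

-- A's fold, from an arbitrary accumulator, produces exactly B's three bucket-index counts
theorem foldl_pvStepA (opinions : List (List (String × String))) (r : Int × Int × Int) :
    opinions.foldl pvStepA r =
      (r.1 + ((opinions.map (fun o => pvBucket.getD (pvRec o) 0)).count 0 : Int),
       r.2.1 + ((opinions.map (fun o => pvBucket.getD (pvRec o) 0)).count 1 : Int),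
       r.2.2 + ((opinions.map (fun o => pvBucket.getD (pvRec o) 0)).count 2 : Int)) := by
  induction opinions generalizing r with
  | nil => simp
  | cons o os ih =>
    have hb : pvBucket.getD (pvRec o) 0 =
        (if pvRec o = "Polecam" then 2 else if pvRec o = "Nie polecam" then 1 else 0) := by
      split_ifs with h1 h2
      · rw [h1]; decide
      · rw [h2]; decide
      · have h1' : ("Polecam" == pvRec o) = false := beq_eq_false_iff_ne.mpr (Ne.symm h1)
        have h2' : ("Nie polecam" == pvRec o) = false := beq_eq_false_iff_ne.mpr (Ne.symm h2)
        simp [pvBucket, PySem.Dict.getD, PySem.Dict.get?, PySem.Dict.ofList,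
              PySem.Dict.update, PySem.Dict.empty, PySem.Dict.items, PySem.Dict.insert,
              List.find?, h1', h2']
    simp only [List.foldl_cons, List.map_cons, hb, ih]
    unfold pvStepA
    split_ifs with h1 h2 <;> simp [Prod.ext_iff] <;> omega

-- ===== VERDICT =====
theorem get_recommendation_stats_spec : Claim_equal_get_recommendation_stats := by
  intro opinions _ _
  unfold Spec_get_recommendation_stats get_recommendation_stats get_recommendation_stats_alt
  simp only [foldl_pvStepA]
  rw [show PySem.List.pyRange 0 3 1 = [0, 1, 2] from by decide]
  simp
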